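-- pv_equiv track=rewrite | github.com/lukegre/fetch-data | fetch_data/utils.py | shorten_url
-- ===== SOURCE A (Python) =====
-- def shorten_url(s, len_limit=75):
--     """
--     Make url shorter with max len set to len_limit
--     """
--
--     if len(s) > len_limit:
--         split = s.split("/")
--     else:
--         return s
--
--     short = split[0]
--     for s in split[1:-1]:
--         if (len(short + split[-1]) + 5) > len_limit:
--             short += "/.../" + split[-1]
--             return short
--         else:
--             short += "/" + s
--     return short
-- ===== SOURCE B (Python) =====
-- def shorten_url(s, len_limit=75):
--     """
--     Make url shorter with max len set to len_limit
--     """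
--     if len(s) <= len_limit:
--         return s
--     parts = s.split("/")
--     if len(parts) == 1:
--         return s
--     tail = parts[-1]
--     for j in range(1, len(parts) - 1):
--         prefix = "/".join(parts[:j])
--         if len(prefix) + len(tail) + 5 > len_limit:
--             return prefix + "/.../" + tail
--     return "/".join(parts[:-1])
-- ===== Notes on version B (the rewrite author's own statement) =====
-- stated objective: alternative
-- what changed: Replaces A's mutable running-concatenation accumulator (short growing across the loop) with an index search: the first prefix length j whose slash-join of the first j parts plus the tail overflows the limit is located, the prefix is built by a join at that point, and the join of all parts but the last is returned when no truncation is needed.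
import Mathlib
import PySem

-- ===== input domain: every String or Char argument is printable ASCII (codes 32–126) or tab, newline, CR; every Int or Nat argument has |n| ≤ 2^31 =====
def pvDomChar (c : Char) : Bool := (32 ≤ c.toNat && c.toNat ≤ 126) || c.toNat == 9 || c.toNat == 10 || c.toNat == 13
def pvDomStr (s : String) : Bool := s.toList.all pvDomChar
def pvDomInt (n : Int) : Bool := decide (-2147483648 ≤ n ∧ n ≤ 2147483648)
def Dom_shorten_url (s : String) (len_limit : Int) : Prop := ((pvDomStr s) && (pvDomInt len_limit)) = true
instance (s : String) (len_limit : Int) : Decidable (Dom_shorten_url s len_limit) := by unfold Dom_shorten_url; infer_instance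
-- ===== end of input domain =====

-- B replaces A's mutable running-concatenation accumulator by an index search that recomputes
-- each candidate prefix by slash-joining the first j parts and joins once at the end; objective: alternative
-- decomposition, same cost.

-- ===== PORT A =====
-- A's for-loop over split[1:-1] with its early return, as structural recursion over that list.
def shortenLoopA (limit : Int) (last : String) : String → List String → String
  | short, [] => short
  | short, x :: xs =>
    if PySem.Str.len (short ++ last) + 5 > limit then short ++ "/.../" ++ last
    else shortenLoopA limit last (short ++ "/" ++ x) xs

def shorten_url (s : String) (len_limit : Int) : String :=
  if PySem.Str.len s > len_limit then
    -- s.split("/"): the separator is nonempty so Str.split? is always `some`; `.getD []` is exact.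
    -- split[0] and split[-1]: split is never empty in Python, so pyGetD with dummy default is exact.
    shortenLoopA len_limit (PySem.List.pyGetD ((PySem.Str.split? s "/").getD []) (-1) "")
      (PySem.List.pyGetD ((PySem.Str.split? s "/").getD []) 0 "")
      (PySem.List.slice ((PySem.Str.split? s "/").getD []) (some 1) (some (-1)))
  else s

-- ===== PORT B =====
-- B's `for j in range(1, len(parts)-1)` as a counter j plus a countdown of remaining iterations.
def altSearchB (limit : Int) (parts : List String) (tail : String) : Nat → Nat → String
  | _, 0 => PySem.Str.join "/" (PySem.List.slice parts none (some (-1)))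
  | j, k+1 =>
    let pre := PySem.Str.join "/" (parts.take j)
    if PySem.Str.len pre + PySem.Str.len tail + 5 > limit then pre ++ "/.../" ++ tail
    else altSearchB limit parts tail (j+1) k

def shorten_url_alt (s : String) (len_limit : Int) : String :=
  if PySem.Str.len s ≤ len_limit then s
  else
    if ((PySem.Str.split? s "/").getD []).length = 1 then s
    else altSearchB len_limit ((PySem.Str.split? s "/").getD [])
      (PySem.List.pyGetD ((PySem.Str.split? s "/").getD []) (-1) "") 1
      (((PySem.Str.split? s "/").getD []).length - 2)

-- ===== PRECONDITION & SPEC =====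
def Spec_shorten_url (s : String) (len_limit : Int) (out : String) : Prop := out = shorten_url_alt s len_limit
instance (s : String) (len_limit : Int) (out : String) : Decidable (Spec_shorten_url s len_limit out) := by unfold Spec_shorten_url; infer_instance

-- ===== CLAIM (what is proved, stated in full; the proofs are below) =====
def Claim_equal_shorten_url : Prop := ∀ (s : String) (len_limit : Int), Dom_shorten_url s len_limit → Spec_shorten_url s len_limit (shorten_url s len_limit)

-- ===== LEMMAS AND PROOFS =====

theorem pv_len_append (a b : String) :
    PySem.Str.len (a ++ b) = PySem.Str.len a + PySem.Str.len b := by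
  simp [PySem.Str.len_eq]

theorem pv_chars_join_append (sep : List Char) (ys : List (List Char)) (y : List Char)
    (h : ys ≠ []) :
    PySem.Chars.join sep (ys ++ [y]) = PySem.Chars.join sep ys ++ sep ++ y := by
  induction ys with
  | nil => exact absurd rfl h
  | cons a t ih =>
    cases t with
    | nil => simp [PySem.Chars.join_cons_cons, PySem.Chars.join_singleton]
    | cons b u =>
      have := ih (by simp)
      simp only [List.cons_append, PySem.Chars.join_cons_cons] at *
      rw [this]
      simp [List.append_assoc]

theorem pv_str_join_append (sep : String) (xs : List String) (x : String) (h : xs ≠ []) :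
    PySem.Str.join sep (xs ++ [x]) = PySem.Str.join sep xs ++ sep ++ x := by
  rw [← String.toList_inj]
  simp only [PySem.Str.join, String.toList_append, String.toList_ofList, List.map_append,
    List.map_cons, List.map_nil]
  exact pv_chars_join_append sep.toList (xs.map String.toList) x.toList (by simpa using h)

theorem pv_go_ne_nil (sep : List Char) :
    ∀ (fuel : Nat) (l cur : List Char) (acc : List (List Char)),
      PySem.Chars.splitOn.go sep fuel l cur acc ≠ [] := by
  intro fuel
  induction fuel with
  | zero => intro l cur acc; show (((cur.reverse ++ l) :: acc).reverse : List (List Char)) ≠ []; simp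
  | succ n ih =>
    intro l cur acc
    cases l with
    | nil => show ((cur.reverse :: acc).reverse : List (List Char)) ≠ []; simp
    | cons c rest =>
      show (if sep.isPrefixOf (c :: rest) then _ else _) ≠ []
      split
      · exact ih _ _ _
      · exact ih _ _ _

theorem pv_go_singleton (sep : List Char) (hsep : sep ≠ []) :
    ∀ (fuel : Nat) (l cur : List Char) (acc : List (List Char)) (p : List Char),
      l.length < fuel →
      PySem.Chars.splitOn.go sep fuel l cur acc = [p] →
      acc = [] ∧ p = cur.reverse ++ l := by
  intro fuel
  induction fuel with
  | zero => intro l cur acc p hfl; omega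
  | succ n ih =>
    intro l cur acc p hfl hgo
    cases l with
    | nil =>
      have : (cur.reverse :: acc).reverse = [p] := hgo
      rcases acc with _ | ⟨a, t⟩
      · simp at this; simp [this]
      · exfalso
        have hl := congrArg List.length this
        simp at hl
    | cons c rest =>
      have hgo' : (if sep.isPrefixOf (c :: rest) then
          PySem.Chars.splitOn.go sep n (List.drop sep.length (c :: rest)) [] (cur.reverse :: acc)
        else PySem.Chars.splitOn.go sep n rest (c :: cur) acc) = [p] := hgo
      by_cases hp : sep.isPrefixOf (c :: rest)
      · rw [if_pos hp] at hgo'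
        have hlen : (List.drop sep.length (c :: rest)).length < n := by
          have : 1 ≤ sep.length := by
            cases sep with | nil => exact absurd rfl hsep | cons a b => simp
          simp only [List.length_drop, List.length_cons] at *
          omega
        have := ih _ _ _ _ hlen hgo'
        simp at this
      · rw [if_neg hp] at hgo'
        have hlen : rest.length < n := by simp at hfl; omega
        obtain ⟨h1, h2⟩ := ih _ _ _ _ hlen hgo'
        refine ⟨h1, ?_⟩
        simp [h2]

theorem pv_splitOn_singleton (s : List Char) (sep : List Char) (hsep : sep ≠ []) (p : List Char)
    (h : PySem.Chars.splitOn s sep = [p]) : p = s := by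
  have := pv_go_singleton sep hsep (s.length + 1) s [] [] p (by omega) h
  simpa using this.2

theorem pv_join_singleton_str (x : String) : PySem.Str.join "/" [x] = x := by
  rw [← String.toList_inj]
  simp [PySem.Str.join, PySem.Chars.join_singleton]

-- the heart: A's accumulator at step j is '/'.join(parts[:j]), so A's loop IS B's index search
theorem pv_main (limit : Int) (parts : List String) (tail : String) :
    ∀ (k j : Nat), 1 ≤ j → j + k + 1 = parts.length →
      shortenLoopA limit tail (PySem.Str.join "/" (parts.take j)) ((parts.drop j).take k)
        = altSearchB limit parts tail j k := by
  intro k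
  induction k with
  | zero =>
    intro j hj hlen
    simp only [List.take_zero, shortenLoopA, altSearchB]
    rw [PySem.List.slice_to_neg_one, List.dropLast_eq_take]
    have hj : parts.length - 1 = j := by omega
    rw [hj]
  | succ k ih =>
    intro j hj hlen
    have hjlt : j < parts.length := by omega
    have hdrop : parts.drop j = parts[j] :: parts.drop (j + 1) :=
      (List.getElem_cons_drop hjlt).symm
    rw [hdrop, List.take_succ_cons]
    simp only [shortenLoopA, altSearchB]
    rw [pv_len_append]
    by_cases hc : PySem.Str.len (PySem.Str.join "/" (parts.take j)) + PySem.Str.len tail + 5 > limit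
    · rw [if_pos hc, if_pos hc]
    · rw [if_neg hc, if_neg hc]
      have htake : parts.take (j + 1) = parts.take j ++ [parts[j]] := by
        rw [List.take_add_one, List.getElem?_eq_getElem hjlt]
        simp
      have hne : parts.take j ≠ [] := by
        rw [← List.length_pos_iff, List.length_take]
        omega
      have hjoin : PySem.Str.join "/" (parts.take j) ++ "/" ++ parts[j]
          = PySem.Str.join "/" (parts.take (j + 1)) := by
        rw [htake, pv_str_join_append "/" _ _ hne]
      rw [hjoin, ih (j + 1) (by omega) (by omega)]

theorem pv_slice_one_neg_one {α : Type} (xs : List α) :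
    PySem.List.slice xs (some 1) (some (-1)) = (xs.drop (min 1 xs.length)).take (xs.length - 1 - min 1 xs.length) := by
  simp only [PySem.List.slice, PySem.List.clampIdx]
  rcases xs with _ | ⟨a, t⟩
  · simp
  · simp only [List.length_cons]
    norm_num
    rw [if_neg (by omega)]
    omega

-- ===== VERDICT (by name: the statement is the Claim_ definition above) =====
theorem pv_two_parts (limit : Int) (p0 p1 : String) (rest : List String) :
    shortenLoopA limit (PySem.List.pyGetD (p0 :: p1 :: rest) (-1) "")
        (PySem.List.pyGetD (p0 :: p1 :: rest) 0 "")
        (PySem.List.slice (p0 :: p1 :: rest) (some 1) (some (-1)))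
      = altSearchB limit (p0 :: p1 :: rest) (PySem.List.pyGetD (p0 :: p1 :: rest) (-1) "") 1
          ((p0 :: p1 :: rest).length - 2) := by
  have h0 : PySem.List.pyGetD (p0 :: p1 :: rest) 0 ""
      = PySem.Str.join "/" ((p0 :: p1 :: rest).take 1) := by
    simp [PySem.List.pyGetD_zero_cons, pv_join_singleton_str]
  rw [h0, pv_slice_one_neg_one]
  have hmin : min 1 (p0 :: p1 :: rest).length = 1 := by simp
  rw [hmin]
  exact pv_main limit (p0 :: p1 :: rest) _ ((p0 :: p1 :: rest).length - 1 - 1) 1 le_rfl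
    (by simp; omega)

-- ===== VERDICT (by name: the statement is the Claim_ definition above) =====
theorem shorten_url_spec : Claim_equal_shorten_url := by
  intro s len_limit _dom
  unfold Spec_shorten_url shorten_url shorten_url_alt
  by_cases hlen : PySem.Str.len s > len_limit
  · rw [if_pos hlen, if_neg (by omega)]
    have hsplit : (PySem.Str.split? s "/").getD []
        = (PySem.Chars.splitOn s.toList ['/']).map String.ofList := by
      simp [PySem.Str.split?, PySem.Chars.split?]
    have hne : PySem.Chars.splitOn s.toList ['/'] ≠ [] :=
      pv_go_ne_nil ['/'] (s.toList.length + 1) s.toList [] []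
    rw [hsplit]
    rcases hcp : PySem.Chars.splitOn s.toList ['/'] with _ | ⟨c0, crest⟩
    · exact absurd hcp hne
    rcases crest with _ | ⟨c1, crest'⟩
    · -- a single part: s contains no '/'; A returns split[0], B returns s, the same string
      have hps : String.ofList c0 = s := by
        rw [pv_splitOn_singleton s.toList ['/'] (by simp) c0 hcp, String.ofList_toList]
      rw [if_pos (by simp)]
      simp only [List.map_cons, List.map_nil]
      have hsl : PySem.List.slice ([String.ofList c0]) (some 1) (some (-1)) = [] := by
        rw [pv_slice_one_neg_one]
        simp
      rw [hsl]
      simp [shortenLoopA, PySem.List.pyGetD_zero_cons, hps]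
    · rw [if_neg (by simp)]
      simp only [List.map_cons]
      exact pv_two_parts len_limit _ _ _
  · rw [if_neg hlen, if_pos (by omega)]
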